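-- pv_equiv track=rewrite | github.com/dianaachim/Cryptography | Lab3/RSA.py | numericalEquivalent
-- ===== SOURCE A (Python) =====
-- alphabet = ['_', 'A', 'B', 'C', 'D', 'E', 'F', 'G', 'H', 'I',
--               'J', 'K', 'L', 'M', 'N', 'O', 'P', 'Q', 'R', 'S', 'T',
--               'U', 'V', 'W', 'X', 'Y', 'Z']
--
-- def numericalEquivalent(messageBlocks):
--     numbers = []
--     alphabet_size = len(alphabet)
--     for block in messageBlocks:
--         reverse = block[::-1]
--         currentPow = 0
--         blockNumber = 0
--         for char in reverse:
--             blockNumber += alphabet.index(char) * (alphabet_size ** currentPow)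
--             currentPow += 1
--         numbers.append(blockNumber)
--     return numbers
-- ===== SOURCE B (Python) =====
-- alphabet = ['_', 'A', 'B', 'C', 'D', 'E', 'F', 'G', 'H', 'I',
--               'J', 'K', 'L', 'M', 'N', 'O', 'P', 'Q', 'R', 'S', 'T',
--               'U', 'V', 'W', 'X', 'Y', 'Z']
--
-- def numericalEquivalent(messageBlocks):
--     size = len(alphabet)
--     index = {}
--     for i, char in enumerate(alphabet):
--         index[char] = i
--     numbers = []
--     for block in messageBlocks:
--         n = 0
--         for char in block:
--             n = n * size + index[char]
--         numbers.append(n)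
--     return numbers
-- ===== Notes on version B (the rewrite author's own statement) =====
-- stated objective: alternative
-- what changed: Replaces A's per-block reversal plus power-counter loop (alphabet.index per char, alphabet_size ** currentPow) with a dict index built once from the alphabet and a left-to-right Horner accumulation n = n*27 + index[char], removing the reversal, the exponentiation and the repeated list scans.
import Mathlib
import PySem

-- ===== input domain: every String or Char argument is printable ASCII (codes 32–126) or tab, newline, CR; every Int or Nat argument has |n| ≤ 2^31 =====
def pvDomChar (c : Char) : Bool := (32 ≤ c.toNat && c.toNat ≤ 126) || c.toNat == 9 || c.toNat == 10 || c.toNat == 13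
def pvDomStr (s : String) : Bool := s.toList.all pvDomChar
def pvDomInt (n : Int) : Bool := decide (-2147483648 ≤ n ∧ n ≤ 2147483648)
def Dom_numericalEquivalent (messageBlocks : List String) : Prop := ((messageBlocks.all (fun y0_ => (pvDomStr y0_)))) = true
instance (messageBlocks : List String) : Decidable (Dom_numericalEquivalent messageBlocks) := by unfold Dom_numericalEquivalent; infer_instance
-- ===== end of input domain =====

-- B builds a char→index dict once and accumulates each block left-to-right with Horner (n = n*27 + index[char]),
-- instead of A's reversal + power counter + repeated alphabet.index scans (alternative decomposition, same cost class).

-- ===== PORT A =====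
def pvAlphabet : List Char :=
  ['_', 'A', 'B', 'C', 'D', 'E', 'F', 'G', 'H', 'I',
   'J', 'K', 'L', 'M', 'N', 'O', 'P', 'Q', 'R', 'S', 'T',
   'U', 'V', 'W', 'X', 'Y', 'Z']

-- alphabet.index(char); getD 0 is never hit under Pre_ (Python raises ValueError there)
def pvIdx (c : Char) : Int := ((PySem.List.index? pvAlphabet c).getD 0 : Nat)

def numericalEquivalent (messageBlocks : List String) : List Int :=
  messageBlocks.foldl (fun numbers block =>
    let reverse := (PySem.Str.slice? block none none (-1)).getD ""   -- block[::-1]; step ≠ 0, never none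
    -- inner loop state (currentPow, blockNumber)
    let st := reverse.toList.foldl
      (fun (s : Nat × Int) char =>
        (s.1 + 1, s.2 + pvIdx char * (pvAlphabet.length : Int) ^ s.1))
      (0, 0)
    numbers ++ [st.2]) []

-- ===== PORT B =====
-- index = {}; for i, char in enumerate(alphabet): index[char] = i
def pvIndexDict : PySem.Dict Char Int :=
  (PySem.List.enumerate pvAlphabet).foldl (fun d p => d.insert p.2 p.1) PySem.Dict.empty

def numericalEquivalent_alt (messageBlocks : List String) : List Int :=
  let size : Int := (pvAlphabet.length : Int)
  messageBlocks.foldl (fun numbers block =>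
    numbers ++ [block.toList.foldl
      -- index[char]; getD 0 never hit under Pre_ (Python raises KeyError there)
      (fun n char => n * size + (pvIndexDict.get? char).getD 0) 0]) []

-- ===== PRECONDITION & SPEC =====
-- Pre_ excludes exactly the inputs on which Python A raises ValueError (B: KeyError): a block character not in the alphabet.
def Pre_numericalEquivalent (messageBlocks : List String) : Prop :=
  (messageBlocks.all (fun b => b.toList.all (fun c => pvAlphabet.contains c))) = true
instance (messageBlocks : List String) : Decidable (Pre_numericalEquivalent messageBlocks) := by
  unfold Pre_numericalEquivalent; infer_instance
def pvWitness_numericalEquivalent : List String := ["HELLO", "", "A_Z"]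
def Spec_numericalEquivalent (messageBlocks : List String) (out : List Int) : Prop :=
  out = numericalEquivalent_alt messageBlocks
instance (messageBlocks : List String) (out : List Int) : Decidable (Spec_numericalEquivalent messageBlocks out) := by
  unfold Spec_numericalEquivalent; infer_instance

-- ===== CLAIM (what is proved, stated in full; the proofs are below) =====
def Claim_equal_numericalEquivalent : Prop := ∀ (messageBlocks : List String), Dom_numericalEquivalent messageBlocks → Pre_numericalEquivalent messageBlocks → Spec_numericalEquivalent messageBlocks (numericalEquivalent messageBlocks)

-- ===== LEMMAS AND PROOFS =====

-- The dict built from enumerate(alphabet) agrees with alphabet.index on every alphabet character.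
theorem pvDictIdx : (pvAlphabet.all
    (fun c => (pvIndexDict.get? c).getD 0 == pvIdx c)) = true := by decide

-- Horner's fold with an arbitrary seed: the seed is shifted by 27^len.
theorem pvHornerShift (l : List Char) (a : Int) :
    l.foldl (fun n c => n * (pvAlphabet.length : Int) + pvIdx c) a
      = a * (pvAlphabet.length : Int) ^ l.length
        + l.foldl (fun n c => n * (pvAlphabet.length : Int) + pvIdx c) 0 := by
  induction l generalizing a with
  | nil => simp
  | cons c t ih =>
    simp only [List.foldl_cons, List.length_cons]
    rw [ih (a * _ + _), ih (0 * _ + _)]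
    ring

-- First component of A's inner loop state counts the characters.
theorem pvFoldFst (l : List Char) (s : Nat × Int) :
    (l.foldl (fun (s : Nat × Int) char =>
        (s.1 + 1, s.2 + pvIdx char * (pvAlphabet.length : Int) ^ s.1)) s).1
      = s.1 + l.length := by
  induction l generalizing s with
  | nil => simp
  | cons c t ih => simp [List.foldl_cons, ih]; omega

-- A's reversed power loop computes the Horner value.
theorem pvBlockEq (l : List Char) :
    (l.reverse.foldl (fun (s : Nat × Int) char =>
        (s.1 + 1, s.2 + pvIdx char * (pvAlphabet.length : Int) ^ s.1)) (0, 0)).2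
      = l.foldl (fun n c => n * (pvAlphabet.length : Int) + pvIdx c) 0 := by
  induction l with
  | nil => simp
  | cons c t ih =>
    rw [List.reverse_cons, List.foldl_append]
    simp only [List.foldl_cons, List.foldl_nil]
    rw [pvFoldFst, ih]
    simp only [List.length_reverse, Nat.zero_add]
    rw [pvHornerShift t (0 * (pvAlphabet.length : Int) + pvIdx c)]
    ring

-- ===== VERDICT (by name: the statement is the Claim_ definition above) =====
theorem numericalEquivalent_spec : Claim_equal_numericalEquivalent := by
  intro ms _ hpre
  unfold Spec_numericalEquivalent numericalEquivalent numericalEquivalent_alt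
  rw [PySem.List.foldl_append_singleton_eq_map, PySem.List.foldl_append_singleton_eq_map]
  simp only [List.nil_append]
  refine List.map_congr_left (fun block hb => ?_)
  have hblk : ∀ c ∈ block.toList, pvAlphabet.contains c := by
    intro c hc
    have := (List.all_eq_true.mp hpre) block hb
    exact List.all_eq_true.mp this c hc
  rw [PySem.Str.slice?_none_none_neg_one]
  simp only [Option.getD_some, String.toList_ofList]
  rw [pvBlockEq block.toList]
  refine PySem.List.foldl_congr_mem _ _ _ _ (fun n c hc => ?_)
  have hmem : c ∈ pvAlphabet := by
    have := hblk c hc; simpa [List.contains_iff_mem] using this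
  have := List.all_eq_true.mp pvDictIdx c hmem
  have heq : (pvIndexDict.get? c).getD 0 = pvIdx c := by exact_mod_cast eq_of_beq this
  rw [heq]
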